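-- pv_equiv track=rewrite | github.com/ldct/cp | codeforces/814/A/A.py | p1_wins
-- ===== SOURCE A (Python) =====
-- def p1_wins(a, b):
--     if a == 1:
--         if b % 2 == 0: return True
--         if b == 1: return False
--         if b == 3: return False
--         return False
--
--     if a % 2 == 0:
--         if a == 2: return not p1_wins(1, b)
--
--         if p1_wins(1, b):
--             return False
--         else:
--             return True
--
--     if a % 2 == 1:
--         if p1_wins(1, b):
--             return True
--         else:
--             return False
-- ===== SOURCE B (Python) =====
-- def p1_wins(a, b):
--     return (a + b) % 2 == 1
-- ===== Notes on version B (the rewrite author's own statement) =====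
-- stated objective: simpler
-- what changed: Replaced A's recursive case analysis (base case a==1, even/odd branches calling p1_wins(1,b)) with the single closed-form parity test (a+b)%2==1.
import Mathlib
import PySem

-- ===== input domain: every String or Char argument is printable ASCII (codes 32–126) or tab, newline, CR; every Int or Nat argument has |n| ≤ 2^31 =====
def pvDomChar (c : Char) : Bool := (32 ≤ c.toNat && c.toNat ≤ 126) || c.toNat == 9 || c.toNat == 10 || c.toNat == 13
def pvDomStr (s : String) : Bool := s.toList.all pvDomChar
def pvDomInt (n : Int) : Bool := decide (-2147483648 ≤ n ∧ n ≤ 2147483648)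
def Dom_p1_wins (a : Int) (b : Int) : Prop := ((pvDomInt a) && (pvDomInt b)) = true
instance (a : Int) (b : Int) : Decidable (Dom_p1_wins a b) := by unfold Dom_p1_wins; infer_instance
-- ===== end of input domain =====

-- B replaces A's recursive even/odd case analysis with the closed-form parity test (a+b) % 2 == 1 (simpler).


-- ===== PORT A =====
def p1_wins (a : Int) (b : Int) : Bool :=
  if a = 1 then
    if PySem.Int.mod b 2 = 0 then true
    else if b = 1 then false
    else if b = 3 then false
    else false
  else if PySem.Int.mod a 2 = 0 then
    (if a = 2 then !(p1_wins 1 b)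
     else if p1_wins 1 b then false else true)
  else if PySem.Int.mod a 2 = 1 then
    (if p1_wins 1 b then true else false)
  else false  -- unreachable: a % 2 is always 0 or 1 in Python
termination_by (if a = 1 then 0 else 1)
decreasing_by all_goals simp_all

-- ===== PORT B =====
def p1_wins_alt (a : Int) (b : Int) : Bool :=
  PySem.Int.mod (a + b) 2 = 1

-- ===== PRECONDITION & SPEC =====
def Spec_p1_wins (a : Int) (b : Int) (out : Bool) : Prop := out = p1_wins_alt a b
instance (a : Int) (b : Int) (out : Bool) : Decidable (Spec_p1_wins a b out) := by unfold Spec_p1_wins; infer_instance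

-- ===== CLAIM (what is proved, stated in full; the proofs are below) =====
def Claim_equal_p1_wins : Prop := ∀ (a : Int) (b : Int), Dom_p1_wins a b → Spec_p1_wins a b (p1_wins a b)

-- ===== LEMMAS AND PROOFS =====

theorem pymod_two (x : Int) : PySem.Int.mod x 2 = x % 2 :=
  PySem.Int.mod_eq_emod_of_pos (by norm_num)

theorem bool_eq_decide (p : Prop) [Decidable p] (b : Bool) : (b = decide p) = (b = true ↔ p) := by
  cases b <;> by_cases h : p <;> simp [h]

theorem p1_wins_one (b : Int) : p1_wins 1 b = decide (PySem.Int.mod b 2 = 0) := by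
  rw [p1_wins]
  simp only [if_true]
  split_ifs <;> simp_all

theorem p1_wins_eq_parity (a b : Int) : p1_wins a b = p1_wins_alt a b := by
  rw [p1_wins, p1_wins_alt]
  simp only [p1_wins_one, pymod_two]
  split_ifs <;> simp only [bool_eq_decide, Bool.not_eq_true', decide_eq_false_iff_not,
    decide_eq_true_eq] <;> simp_all <;> omega

-- ===== VERDICT (by name: the statement is the Claim_ definition above) =====
theorem p1_wins_spec : Claim_equal_p1_wins := by
  intro a b _
  exact p1_wins_eq_parity a b
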